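-- pv_equiv track=rewrite | github.com/Extremezhazha/python-smartqq-client | pyqqclient/SmartqqHash.py | smartqq_hash
-- ===== SOURCE A (Python) =====
-- def smartqq_hash(uin, ptwebqq):
--     n = [0] * 4
--     for T in range(len(ptwebqq)):
--         n[T % 4] ^= ord(ptwebqq[T])
--     u, v = 'ECOK', [0] * 4
--     v[0] = ((uin >> 24) & 255) ^ ord(u[0])
--     v[1] = ((uin >> 16) & 255) ^ ord(u[1])
--     v[2] = ((uin >> 8) & 255) ^ ord(u[2])
--     v[3] = ((uin >> 0) & 255) ^ ord(u[3])
--     u1 = [0] * 8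
--     for T in range(8):
--         u1[T] = n[T >> 1] if T % 2 == 0 else v[T >> 1]
--     n1, v1 = '0123456789ABCDEF', ''
--     for aU1 in u1:
--         v1 += n1[((aU1 >> 4) & 15)]
--         v1 += n1[((aU1 >> 0) & 15)]
--     return v1
-- ===== SOURCE B (Python) =====
-- def smartqq_hash(uin, ptwebqq):
--     # XOR the string as big-endian 4-byte words (last chunk left-aligned):
--     # byte i of N is the XOR of the chars at positions congruent to i mod 4.
--     N = 0
--     rest = ptwebqq
--     while rest:
--         chunk, rest = rest[:4], rest[4:]
--         w = 0
--         for ch in chunk: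
--             w = w * 256 + ord(ch)
--         N ^= w * 256 ** (4 - len(chunk))
--     # the key-mixed uin as one 32-bit word ('ECOK' == 0x45434F4B)
--     V = (uin % 2 ** 32) ^ 0x45434F4B
--     # interleave the bytes of N and V into one 64-bit number
--     H = 0
--     for s in (24, 16, 8, 0):
--         H = H * 65536 + (N // 2 ** s) % 256 * 256 + (V // 2 ** s) % 256
--     # emit its 16 uppercase hex digits back-to-front
--     digits = []
--     for _ in range(16):
--         H, d = divmod(H, 16)
--         digits.append('0123456789ABCDEF'[d])
--     return ''.join(reversed(digits))
-- ===== Notes on version B (the rewrite author's own statement) =====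
-- stated objective: alternative
-- what changed: B replaces A's four byte-bucket lists and 8-slot interleave buffer with word arithmetic: it XOR-folds the string as big-endian 4-byte chunk words, mixes uin as a single 32-bit word with 0x45434F4B ('ECOK'), packs the interleaved bytes into one 64-bit number and emits its 16 uppercase hex digits back-to-front by repeated divmod(., 16).
import Mathlib
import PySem

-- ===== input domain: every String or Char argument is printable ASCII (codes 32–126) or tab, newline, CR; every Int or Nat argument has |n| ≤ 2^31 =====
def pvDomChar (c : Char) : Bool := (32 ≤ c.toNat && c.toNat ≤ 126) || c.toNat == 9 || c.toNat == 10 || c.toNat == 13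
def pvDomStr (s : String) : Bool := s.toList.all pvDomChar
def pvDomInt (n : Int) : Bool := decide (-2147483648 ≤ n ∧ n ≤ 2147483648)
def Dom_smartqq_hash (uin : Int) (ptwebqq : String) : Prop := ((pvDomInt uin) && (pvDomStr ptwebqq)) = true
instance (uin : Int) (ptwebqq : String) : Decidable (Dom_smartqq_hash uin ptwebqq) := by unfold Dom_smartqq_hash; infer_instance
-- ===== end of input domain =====

-- B recomputes the hash at word level: it XOR-folds the string as big-endian 4-byte words,
-- mixes uin as one 32-bit word with 0x45434F4B ('ECOK'), packs everything into a single
-- 64-bit number and emits its 16 hex digits back-to-front by divmod (objective: alternative).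

-- ===== PORT A =====
-- ord(c)
def pvOrd (c : Char) : Int := (c.toNat : Int)

def smartqq_hash (uin : Int) (ptwebqq : String) : String :=
  let s := ptwebqq.toList
  let n : List Int := (PySem.List.pyRange 0 (PySem.List.len s)).foldl
    (fun n T => PySem.List.pySetD n (PySem.Int.mod T 4)
      (PySem.Int.bxor (PySem.List.pyGetD n (PySem.Int.mod T 4) 0)
        (pvOrd (PySem.List.pyGetD s T ' ')))) [0, 0, 0, 0]
  let u : List Char := "ECOK".toList
  let v : List Int := [0, 0, 0, 0]
  let v := PySem.List.pySetD v 0 (PySem.Int.bxor (PySem.Int.band (uin >>> (24:Nat)) 255) (pvOrd (PySem.List.pyGetD u 0 ' ')))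
  let v := PySem.List.pySetD v 1 (PySem.Int.bxor (PySem.Int.band (uin >>> (16:Nat)) 255) (pvOrd (PySem.List.pyGetD u 1 ' ')))
  let v := PySem.List.pySetD v 2 (PySem.Int.bxor (PySem.Int.band (uin >>> (8:Nat)) 255) (pvOrd (PySem.List.pyGetD u 2 ' ')))
  let v := PySem.List.pySetD v 3 (PySem.Int.bxor (PySem.Int.band (uin >>> (0:Nat)) 255) (pvOrd (PySem.List.pyGetD u 3 ' ')))
  let u1 : List Int := (PySem.List.pyRange 0 8).foldl
    (fun u1 T => PySem.List.pySetD u1 T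
      (if PySem.Int.mod T 2 = 0 then PySem.List.pyGetD n (T >>> (1:Nat)) 0
       else PySem.List.pyGetD v (T >>> (1:Nat)) 0)) [0, 0, 0, 0, 0, 0, 0, 0]
  let n1 : List Char := "0123456789ABCDEF".toList
  let v1 : List Char := u1.foldl (fun v1 (aU1 : Int) =>
    (v1 ++ [PySem.List.pyGetD n1 (PySem.Int.band (aU1 >>> (4:Nat)) 15) ' '])
      ++ [PySem.List.pyGetD n1 (PySem.Int.band (aU1 >>> (0:Nat)) 15) ' ']) []
  String.ofList v1

-- ===== PORT B =====
-- the 'while rest:' loop: XOR in each big-endian 4-byte chunk word (short last chunk left-aligned)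
def pvWordXor (N : Int) (rest : List Char) : Int :=
  match rest with
  | [] => N
  | c :: t =>
    let chunk := PySem.List.slice (c :: t) none (some 4)
    let rest' := PySem.List.slice (c :: t) (some 4) none
    let w := chunk.foldl (fun w ch => w * 256 + pvOrd ch) 0
    pvWordXor (PySem.Int.bxor N (w * 256 ^ (4 - chunk.length))) rest'
termination_by rest.length
decreasing_by
  rw [PySem.List.slice_from _ (show (0:Int) ≤ 4 by norm_num)]
  simp

def smartqq_hash_alt (uin : Int) (ptwebqq : String) : String :=
  let N := pvWordXor 0 ptwebqq.toList
  let V := PySem.Int.bxor (PySem.Int.mod uin (2 ^ 32)) 0x45434F4B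
  let H := [(24:Nat), 16, 8, 0].foldl
    (fun H s => H * 65536 + PySem.Int.mod (PySem.Int.floordiv N (2 ^ s)) 256 * 256
                          + PySem.Int.mod (PySem.Int.floordiv V (2 ^ s)) 256) 0
  let st := (PySem.List.pyRange 0 16).foldl
    (fun (st : Int × List Char) _ =>
      (PySem.Int.floordiv st.1 16,
       st.2 ++ [PySem.List.pyGetD "0123456789ABCDEF".toList (PySem.Int.mod st.1 16) ' '])) (H, [])
  String.ofList st.2.reverse

-- ===== PRECONDITION & SPEC =====
def Spec_smartqq_hash (uin : Int) (ptwebqq : String) (out : String) : Prop := out = smartqq_hash_alt uin ptwebqq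
instance (uin : Int) (ptwebqq : String) (out : String) : Decidable (Spec_smartqq_hash uin ptwebqq out) := by unfold Spec_smartqq_hash; infer_instance

-- ===== CLAIM (what is proved, stated in full; the proofs are below) =====
def Claim_equal_smartqq_hash : Prop := ∀ (uin : Int) (ptwebqq : String), Dom_smartqq_hash uin ptwebqq → Spec_smartqq_hash uin ptwebqq (smartqq_hash uin ptwebqq)

-- ===== LEMMAS AND PROOFS =====

-- Nat-level reference values: the four XOR buckets of the string …
def pvRefN : List Char → Nat × Nat × Nat × Nat
  | [] => (0, 0, 0, 0)
  | [a] => (a.toNat, 0, 0, 0)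
  | [a, b] => (a.toNat, b.toNat, 0, 0)
  | [a, b, c] => (a.toNat, b.toNat, c.toNat, 0)
  | a :: b :: c :: d :: rest =>
    let r := pvRefN rest
    (a.toNat ^^^ r.1, b.toNat ^^^ r.2.1, c.toNat ^^^ r.2.2.1, d.toNat ^^^ r.2.2.2)

-- … and the same buckets packed as one 32-bit XOR of chunk words
def pvWordN : List Char → Nat
  | [] => 0
  | [a] => a.toNat * 16777216
  | [a, b] => (a.toNat * 256 + b.toNat) * 65536
  | [a, b, c] => ((a.toNat * 256 + b.toNat) * 256 + c.toNat) * 256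
  | a :: b :: c :: d :: rest =>
    (((a.toNat * 256 + b.toNat) * 256 + c.toNat) * 256 + d.toNat) ^^^ pvWordN rest

theorem pv_enumerate_append_singleton {α : Type} (xs : List α) (c : α) (k : Int) :
    PySem.List.enumerate (xs ++ [c]) k = PySem.List.enumerate xs k ++ [(k + xs.length, c)] := by
  induction xs generalizing k with
  | nil => simp [PySem.List.enumerate]
  | cons x t ih =>
      simp [PySem.List.enumerate, ih (k + 1)]
      omega

theorem pv_foldl_pyRange_enumerate {α β : Type} (s : List α) (d : α) (F : β → Int → α → β) (init : β) :
    (PySem.List.pyRange 0 (PySem.List.len s)).foldl (fun acc T => F acc T (PySem.List.pyGetD s T d)) init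
      = (PySem.List.enumerate s).foldl (fun acc p => F acc p.1 p.2) init := by
  induction s using List.reverseRecOn generalizing init with
  | nil => simp [PySem.List.enumerate, PySem.List.pyRange_one_eq_nil]
  | append_singleton s' c ih =>
      rw [pv_enumerate_append_singleton, List.foldl_append]
      have hlen : PySem.List.len (s' ++ [c]) = (s'.length : Int) + 1 := by
        simp [PySem.List.len_eq]
      rw [hlen, PySem.List.pyRange_one_succ_right (by positivity), List.foldl_append]
      have hcongr : ∀ (acc : β), ∀ T ∈ PySem.List.pyRange 0 (s'.length : Int),
          F acc T (PySem.List.pyGetD (s' ++ [c]) T d) = F acc T (PySem.List.pyGetD s' T d) := by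
        intro acc T hT
        rw [PySem.List.mem_pyRange_one] at hT
        have hlt : T.toNat < s'.length := by omega
        rw [PySem.List.pyGetD_eq_getElem _ _ hT.1 (by simp only [List.length_append, List.length_singleton]; push_cast; omega),
            PySem.List.pyGetD_eq_getElem _ _ hT.1 (by omega)]
        congr 1
        exact List.getElem_append_left hlt
      rw [PySem.List.foldl_congr_mem _ _ _ init hcongr]
      have hlast : PySem.List.pyGetD (s' ++ [c]) (s'.length : Int) d = c := by
        rw [PySem.List.pyGetD_natCast]
        simp
      have := ih (init := init)
      simp only [PySem.List.len_eq] at this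
      rw [this]
      simp only [List.foldl_cons, List.foldl_nil, zero_add]
      rw [hlast]

-- one A-loop step at each of the four bucket indices
theorem pvStep0 (x0 x1 x2 x3 : Nat) (c : Char) :
    PySem.List.pySetD [((x0:Nat):Int), ↑x1, ↑x2, ↑x3] 0
      (PySem.Int.bxor (PySem.List.pyGetD [((x0:Nat):Int), ↑x1, ↑x2, ↑x3] 0 0) (pvOrd c))
      = [((x0 ^^^ c.toNat : Nat):Int), ↑x1, ↑x2, ↑x3] := by
  simp [pvOrd, PySem.List.pyGetD_zero_cons, PySem.List.pySetD_of_nonneg]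

theorem pvStep1 (x0 x1 x2 x3 : Nat) (c : Char) :
    PySem.List.pySetD [((x0:Nat):Int), ↑x1, ↑x2, ↑x3] 1
      (PySem.Int.bxor (PySem.List.pyGetD [((x0:Nat):Int), ↑x1, ↑x2, ↑x3] 1 0) (pvOrd c))
      = [((x0:Nat):Int), ↑(x1 ^^^ c.toNat), ↑x2, ↑x3] := by
  simp [pvOrd, PySem.List.pyGetD_ofNat', PySem.List.pySetD_of_nonneg]

theorem pvStep2 (x0 x1 x2 x3 : Nat) (c : Char) :
    PySem.List.pySetD [((x0:Nat):Int), ↑x1, ↑x2, ↑x3] 2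
      (PySem.Int.bxor (PySem.List.pyGetD [((x0:Nat):Int), ↑x1, ↑x2, ↑x3] 2 0) (pvOrd c))
      = [((x0:Nat):Int), ↑x1, ↑(x2 ^^^ c.toNat), ↑x3] := by
  simp [pvOrd, PySem.List.pyGetD_ofNat', PySem.List.pySetD_of_nonneg]

theorem pvStep3 (x0 x1 x2 x3 : Nat) (c : Char) :
    PySem.List.pySetD [((x0:Nat):Int), ↑x1, ↑x2, ↑x3] 3
      (PySem.Int.bxor (PySem.List.pyGetD [((x0:Nat):Int), ↑x1, ↑x2, ↑x3] 3 0) (pvOrd c))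
      = [((x0:Nat):Int), ↑x1, ↑x2, ↑(x3 ^^^ c.toNat)] := by
  simp [pvOrd, PySem.List.pyGetD_ofNat', PySem.List.pySetD_of_nonneg]

-- A's bucket loop computes pvRefN (state and start index generalized; k only needs k % 4 = 0)
theorem pvBucketA (s : List Char) : ∀ (k : Int) (m0 m1 m2 m3 : Nat), k % 4 = 0 →
    (PySem.List.enumerate s k).foldl
      (fun n p => PySem.List.pySetD n (PySem.Int.mod p.1 4)
        (PySem.Int.bxor (PySem.List.pyGetD n (PySem.Int.mod p.1 4) 0) (pvOrd p.2)))
      [((m0:Nat):Int), ↑m1, ↑m2, ↑m3]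
    = [((m0 ^^^ (pvRefN s).1 : Nat):Int), ↑(m1 ^^^ (pvRefN s).2.1),
        ↑(m2 ^^^ (pvRefN s).2.2.1), ↑(m3 ^^^ (pvRefN s).2.2.2)] := by
  induction s using pvRefN.induct with
  | case1 =>
      intro k m0 m1 m2 m3 hk
      simp [PySem.List.enumerate, pvRefN]
  | case2 a =>
      intro k m0 m1 m2 m3 hk
      have e0 : PySem.Int.mod k 4 = 0 := by
        rw [PySem.Int.mod_eq_emod_of_pos (by norm_num)]; omega
      simp only [PySem.List.enumerate_cons, PySem.List.enumerate_nil, List.foldl_cons, List.foldl_nil]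
      rw [e0, pvStep0]
      simp [pvRefN]
  | case3 a b =>
      intro k m0 m1 m2 m3 hk
      have e0 : PySem.Int.mod k 4 = 0 := by
        rw [PySem.Int.mod_eq_emod_of_pos (by norm_num)]; omega
      have e1 : PySem.Int.mod (k + 1) 4 = 1 := by
        rw [PySem.Int.mod_eq_emod_of_pos (by norm_num)]; omega
      simp only [PySem.List.enumerate_cons, PySem.List.enumerate_nil, List.foldl_cons, List.foldl_nil]
      rw [e0, pvStep0, e1, pvStep1]
      simp [pvRefN]
  | case4 a b c =>
      intro k m0 m1 m2 m3 hk
      have e0 : PySem.Int.mod k 4 = 0 := by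
        rw [PySem.Int.mod_eq_emod_of_pos (by norm_num)]; omega
      have e1 : PySem.Int.mod (k + 1) 4 = 1 := by
        rw [PySem.Int.mod_eq_emod_of_pos (by norm_num)]; omega
      have e2 : PySem.Int.mod (k + 1 + 1) 4 = 2 := by
        rw [PySem.Int.mod_eq_emod_of_pos (by norm_num)]; omega
      simp only [PySem.List.enumerate_cons, PySem.List.enumerate_nil, List.foldl_cons, List.foldl_nil]
      rw [e0, pvStep0, e1, pvStep1, e2, pvStep2]
      simp [pvRefN]
  | case5 a b c d rest ih =>
      intro k m0 m1 m2 m3 hk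
      have e0 : PySem.Int.mod k 4 = 0 := by
        rw [PySem.Int.mod_eq_emod_of_pos (by norm_num)]; omega
      have e1 : PySem.Int.mod (k + 1) 4 = 1 := by
        rw [PySem.Int.mod_eq_emod_of_pos (by norm_num)]; omega
      have e2 : PySem.Int.mod (k + 1 + 1) 4 = 2 := by
        rw [PySem.Int.mod_eq_emod_of_pos (by norm_num)]; omega
      have e3 : PySem.Int.mod (k + 1 + 1 + 1) 4 = 3 := by
        rw [PySem.Int.mod_eq_emod_of_pos (by norm_num)]; omega
      simp only [PySem.List.enumerate_cons, List.foldl_cons]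
      rw [e0, pvStep0, e1, pvStep1, e2, pvStep2, e3, pvStep3]
      rw [ih (k + 1 + 1 + 1 + 1) _ _ _ _ (by omega)]
      simp [pvRefN, Nat.xor_assoc]

theorem pvSliceTo4 {α : Type} (xs : List α) : PySem.List.slice xs none (some 4) = xs.take 4 := by
  rw [PySem.List.slice_to xs (show (0:Int) ≤ 4 by norm_num)]
  rfl

theorem pvSliceFrom4 {α : Type} (xs : List α) : PySem.List.slice xs (some 4) none = xs.drop 4 := by
  rw [PySem.List.slice_from xs (show (0:Int) ≤ 4 by norm_num)]
  rfl

theorem pvWordXor_nil (N : Int) : pvWordXor N [] = N := by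
  rw [pvWordXor.eq_def]

-- w-packing loop over a chunk, Nat-valued
theorem pvWfold (l : List Char) : ∀ (m : Nat),
    l.foldl (fun w ch => w * 256 + pvOrd ch) ((m:Nat):Int)
      = ((l.foldl (fun w ch => w * 256 + ch.toNat) m : Nat) : Int) := by
  induction l with
  | nil => intro m; simp
  | cons c t ih =>
      intro m
      simp only [List.foldl_cons]
      rw [show ((m:Nat):Int) * 256 + pvOrd c = (((m * 256 + c.toNat : Nat)):Int) by
        simp only [pvOrd]; push_cast; try ring]
      exact ih _

-- B's while-loop computes the Nat word XOR
theorem pvWordXor_eq (s : List Char) : ∀ (n : Nat),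
    pvWordXor ((n:Nat):Int) s = ((n ^^^ pvWordN s : Nat) : Int) := by
  induction s using pvWordN.induct with
  | case1 => intro n; rw [pvWordXor_nil]; simp [pvWordN]
  | case2 a =>
      intro n
      rw [pvWordXor.eq_def]
      dsimp only
      rw [pvSliceTo4, pvSliceFrom4,
        show ([a] : List Char).take 4 = [a] from rfl,
        show ([a] : List Char).drop 4 = ([] : List Char) from rfl, pvWordXor_nil,
        show (0:Int) = ((0:Nat):Int) from rfl, pvWfold]
      rw [show (([a] : List Char).length) = 1 from rfl]
      rw [show ((([a].foldl (fun w ch => w * 256 + ch.toNat) 0 : Nat)):Int) * 256 ^ (4 - 1)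
            = ((a.toNat * 16777216 : Nat) : Int) by push_cast; simp [List.foldl]; try ring]
      rw [PySem.Int.bxor_natCast]
      simp [pvWordN]
  | case3 a b =>
      intro n
      rw [pvWordXor.eq_def]
      dsimp only
      rw [pvSliceTo4, pvSliceFrom4,
        show ([a, b] : List Char).take 4 = [a, b] from rfl,
        show ([a, b] : List Char).drop 4 = ([] : List Char) from rfl, pvWordXor_nil,
        show (0:Int) = ((0:Nat):Int) from rfl, pvWfold]
      rw [show (([a, b] : List Char).length) = 2 from rfl]
      rw [show ((([a, b].foldl (fun w ch => w * 256 + ch.toNat) 0 : Nat)):Int) * 256 ^ (4 - 2)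
            = (((a.toNat * 256 + b.toNat) * 65536 : Nat) : Int) by push_cast; simp [List.foldl]; try ring]
      rw [PySem.Int.bxor_natCast]
      simp [pvWordN]
  | case4 a b c =>
      intro n
      rw [pvWordXor.eq_def]
      dsimp only
      rw [pvSliceTo4, pvSliceFrom4,
        show ([a, b, c] : List Char).take 4 = [a, b, c] from rfl,
        show ([a, b, c] : List Char).drop 4 = ([] : List Char) from rfl, pvWordXor_nil,
        show (0:Int) = ((0:Nat):Int) from rfl, pvWfold]
      rw [show (([a, b, c] : List Char).length) = 3 from rfl]
      rw [show ((([a, b, c].foldl (fun w ch => w * 256 + ch.toNat) 0 : Nat)):Int) * 256 ^ (4 - 3)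
            = ((((a.toNat * 256 + b.toNat) * 256 + c.toNat) * 256 : Nat) : Int) by
          push_cast; simp [List.foldl]; try ring]
      rw [PySem.Int.bxor_natCast]
      simp [pvWordN]
  | case5 a b c d rest ih =>
      intro n
      rw [pvWordXor.eq_def]
      dsimp only
      rw [pvSliceTo4, pvSliceFrom4,
        show ((a :: b :: c :: d :: rest) : List Char).take 4 = [a, b, c, d] from rfl,
        show ((a :: b :: c :: d :: rest) : List Char).drop 4 = rest from rfl,
        show (0:Int) = ((0:Nat):Int) from rfl, pvWfold]
      rw [show (([a, b, c, d] : List Char).length) = 4 from rfl]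
      rw [show ((([a, b, c, d].foldl (fun w ch => w * 256 + ch.toNat) 0 : Nat)):Int) * 256 ^ (4 - 4)
            = (((((a.toNat * 256 + b.toNat) * 256 + c.toNat) * 256 + d.toNat : Nat)) : Int) by
          push_cast; simp [List.foldl]; try ring]
      rw [PySem.Int.bxor_natCast, ih]
      rw [pvWordN]
      simp [Nat.xor_assoc]

-- a byte of a Nat XOR is the XOR of the bytes
theorem pvX1 (k a b : Nat) : (a ^^^ b) / 2 ^ k % 256 = (a / 2 ^ k % 256) ^^^ (b / 2 ^ k % 256) := by
  apply Nat.eq_of_testBit_eq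
  intro i
  simp only [← Nat.shiftRight_eq_div_pow, show (256:Nat) = 2 ^ 8 from rfl,
    Nat.testBit_mod_two_pow, Nat.testBit_shiftRight, Nat.testBit_xor]
  by_cases h : i < 8 <;> simp [h]

theorem pvXorLt (x y : Nat) (hx : x < 256) (hy : y < 256) : x ^^^ y < 256 := by
  have h := pvX1 0 x y
  simp [Nat.mod_eq_of_lt hx, Nat.mod_eq_of_lt hy] at h
  omega

-- all four bucket values are bytes
theorem pvRefN_lt (s : List Char) (hs : ∀ c ∈ s, c.toNat < 256) :
    (pvRefN s).1 < 256 ∧ (pvRefN s).2.1 < 256 ∧ (pvRefN s).2.2.1 < 256 ∧ (pvRefN s).2.2.2 < 256 := by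
  induction s using pvRefN.induct with
  | case1 => simp [pvRefN]
  | case2 a => simp_all [pvRefN]
  | case3 a b => simp_all [pvRefN]
  | case4 a b c => simp_all [pvRefN]
  | case5 a b c d rest ih =>
      have ha := hs a (by simp)
      have hb := hs b (by simp)
      have hc := hs c (by simp)
      have hd := hs d (by simp)
      have hrest := ih (fun x hx => hs x (by simp [hx]))
      simp only [pvRefN]
      exact ⟨pvXorLt _ _ ha hrest.1, pvXorLt _ _ hb hrest.2.1,
        pvXorLt _ _ hc hrest.2.2.1, pvXorLt _ _ hd hrest.2.2.2⟩

-- the bytes of the packed word are the buckets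
theorem pvWordBytes (s : List Char) (hs : ∀ c ∈ s, c.toNat < 256) :
    pvWordN s / 16777216 % 256 = (pvRefN s).1 ∧
    pvWordN s / 65536 % 256 = (pvRefN s).2.1 ∧
    pvWordN s / 256 % 256 = (pvRefN s).2.2.1 ∧
    pvWordN s / 1 % 256 = (pvRefN s).2.2.2 := by
  induction s using pvRefN.induct with
  | case1 => simp [pvRefN, pvWordN]
  | case2 a =>
      have ha := hs a (by simp)
      simp only [pvRefN, pvWordN]
      omega
  | case3 a b =>
      have ha := hs a (by simp)
      have hb := hs b (by simp)
      simp only [pvRefN, pvWordN]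
      omega
  | case4 a b c =>
      have ha := hs a (by simp)
      have hb := hs b (by simp)
      have hc := hs c (by simp)
      simp only [pvRefN, pvWordN]
      omega
  | case5 a b c d rest ih =>
      have ha := hs a (by simp)
      have hb := hs b (by simp)
      have hc := hs c (by simp)
      have hd := hs d (by simp)
      have hrest := ih (fun x hx => hs x (by simp [hx]))
      simp only [pvRefN, pvWordN]
      set w := ((a.toNat * 256 + b.toNat) * 256 + c.toNat) * 256 + d.toNat with hw
      have h24 := pvX1 24 w (pvWordN rest)
      have h16 := pvX1 16 w (pvWordN rest)
      have h8 := pvX1 8 w (pvWordN rest)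
      have h0 := pvX1 0 w (pvWordN rest)
      norm_num at h24 h16 h8 h0
      refine ⟨?_, ?_, ?_, ?_⟩
      · rw [h24, show w / 16777216 % 256 = a.toNat by omega, hrest.1]
      · rw [h16, show w / 65536 % 256 = b.toNat by omega, hrest.2.1]
      · rw [h8, show w / 256 % 256 = c.toNat by omega, hrest.2.2.1]
      · simp only [Nat.div_one] at h0 hrest ⊢
        rw [h0, show w % 256 = d.toNat by omega, hrest.2.2.2]

-- arithmetic meaning of Python's >> and & masks on Int
theorem pvShiftR (x : Int) (n : Nat) : x >>> n = x / 2 ^ n := by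
  cases x with
  | ofNat m =>
      have h1 : (Int.ofNat m) >>> n = Int.ofNat (m >>> n) := rfl
      rw [h1, Nat.shiftRight_eq_div_pow]
      show ((m / 2 ^ n : Nat) : Int) = (m : Int) / 2 ^ n
      rw [Int.natCast_div]
      push_cast
      rfl
  | negSucc m =>
      have h1 : (Int.negSucc m) >>> n = Int.negSucc (m >>> n) := rfl
      rw [h1, Nat.shiftRight_eq_div_pow, Int.negSucc_eq, Int.negSucc_eq]
      have hp : (0:Int) < 2 ^ n := by positivity
      have hdm := Nat.div_add_mod m (2 ^ n)
      have hml : m % 2 ^ n < 2 ^ n := Nat.mod_lt _ (by positivity)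
      have key : -((m:Int) + 1)
          = ((2:Int) ^ n - 1 - (m % 2 ^ n : Nat)) + (-(((m / 2 ^ n : Nat)):Int) - 1) * 2 ^ n := by
        have hcast : ((m:Int)) = 2 ^ n * ((m / 2 ^ n : Nat) : Int) + ((m % 2 ^ n : Nat) : Int) := by
          exact_mod_cast hdm.symm
        rw [hcast]; push_cast; ring
      rw [key, Int.add_mul_ediv_right _ _ (by positivity : (0:Int) < 2 ^ n).ne']
      rw [Int.ediv_eq_zero_of_lt (by push_cast; omega) (by push_cast; omega)]
      ring

theorem pvBand255 (x : Int) : PySem.Int.band x 255 = x % 256 := by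
  unfold PySem.Int.band
  by_cases h : 0 ≤ x
  · rw [if_pos h, if_pos (by norm_num : (0:Int) ≤ 255)]
    have h2 : x.toNat &&& (255:Int).toNat = x.toNat % 256 := by
      simpa using Nat.and_two_pow_sub_one_eq_mod x.toNat 8
    rw [h2]
    omega
  · rw [if_neg h, if_pos (by norm_num : (0:Int) ≤ 255)]
    have hm : (255:Int).toNat &&& (-x - 1).toNat = (-x - 1).toNat % 256 := by
      have h1 := Nat.and_two_pow_sub_one_eq_mod (-x - 1).toNat 8
      rw [show ((2:Nat) ^ 8 - 1) = 255 from rfl] at h1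
      rw [show (255:Int).toNat = 255 from rfl, Nat.and_comm]
      exact h1
    rw [hm]
    omega

theorem pvBand15 (x : Int) : PySem.Int.band x 15 = x % 16 := by
  unfold PySem.Int.band
  by_cases h : 0 ≤ x
  · rw [if_pos h, if_pos (by norm_num : (0:Int) ≤ 15)]
    have h2 : x.toNat &&& (15:Int).toNat = x.toNat % 16 := by
      simpa using Nat.and_two_pow_sub_one_eq_mod x.toNat 4
    rw [h2]
    omega
  · rw [if_neg h, if_pos (by norm_num : (0:Int) ≤ 15)]
    have hm : (15:Int).toNat &&& (-x - 1).toNat = (-x - 1).toNat % 16 := by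
      have h1 := Nat.and_two_pow_sub_one_eq_mod (-x - 1).toNat 4
      rw [show ((2:Nat) ^ 4 - 1) = 15 from rfl] at h1
      rw [show (15:Int).toNat = 15 from rfl, Nat.and_comm]
      exact h1
    rw [hm]
    omega

theorem pvShiftR4 (x : Int) : x >>> (4:Nat) = x / 16 := by
  have := pvShiftR x 4
  norm_num at this
  exact this

-- bytes of a Nat under PySem's floordiv/mod
theorem pvByteCast (W D : Nat) (hD : 0 < D) :
    PySem.Int.mod (PySem.Int.floordiv ((W:Nat):Int) ((D:Nat):Int)) 256 = ((W / D % 256 : Nat) : Int) := by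
  rw [PySem.Int.floordiv_eq_ediv_of_pos (by exact_mod_cast hD),
    PySem.Int.mod_eq_emod_of_pos (by norm_num), ← Int.natCast_div,
    show (256:Int) = ((256:Nat):Int) from by norm_num, ← Int.natCast_mod]

-- A's uin byte expressions, as casts of the bytes of (uin % 2^32)
theorem pvEcast24 (uin : Int) :
    PySem.Int.bxor (PySem.Int.band (uin >>> (24:Nat)) 255) 69
      = ((((uin % 4294967296).toNat / 16777216 % 256) ^^^ 69 : Nat) : Int) := by
  rw [pvBand255, pvShiftR]
  norm_num
  have h : uin / 16777216 % 256 = (((uin % 4294967296).toNat / 16777216 % 256 : Nat) : Int) := by omega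
  rw [h, show (69:Int) = ((69:Nat):Int) from by norm_num, PySem.Int.bxor_natCast]

theorem pvEcast16 (uin : Int) :
    PySem.Int.bxor (PySem.Int.band (uin >>> (16:Nat)) 255) 67
      = ((((uin % 4294967296).toNat / 65536 % 256) ^^^ 67 : Nat) : Int) := by
  rw [pvBand255, pvShiftR]
  norm_num
  have h : uin / 65536 % 256 = (((uin % 4294967296).toNat / 65536 % 256 : Nat) : Int) := by omega
  rw [h, show (67:Int) = ((67:Nat):Int) from by norm_num, PySem.Int.bxor_natCast]

theorem pvEcast8 (uin : Int) :
    PySem.Int.bxor (PySem.Int.band (uin >>> (8:Nat)) 255) 79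
      = ((((uin % 4294967296).toNat / 256 % 256) ^^^ 79 : Nat) : Int) := by
  rw [pvBand255, pvShiftR]
  norm_num
  have h : uin / 256 % 256 = (((uin % 4294967296).toNat / 256 % 256 : Nat) : Int) := by omega
  rw [h, show (79:Int) = ((79:Nat):Int) from by norm_num, PySem.Int.bxor_natCast]

theorem pvEcast0 (uin : Int) :
    PySem.Int.bxor (PySem.Int.band (uin >>> (0:Nat)) 255) 75
      = ((((uin % 4294967296).toNat % 256) ^^^ 75 : Nat) : Int) := by
  rw [pvBand255]
  rw [show uin >>> (0:Nat) = uin from by rw [pvShiftR]; norm_num]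
  have h : uin % 256 = (((uin % 4294967296).toNat % 256 : Nat) : Int) := by omega
  rw [h, show (75:Int) = ((75:Nat):Int) from by norm_num, PySem.Int.bxor_natCast]

-- B's mixed word, as a cast
theorem pvVcast (uin : Int) :
    PySem.Int.bxor (PySem.Int.mod uin 4294967296) 1162039115
      = (((uin % 4294967296).toNat ^^^ 1162039115 : Nat) : Int) := by
  have h0 : (0:Int) < 4294967296 := by norm_num
  have hnn : 0 ≤ PySem.Int.mod uin 4294967296 := PySem.Int.mod_nonneg uin h0
  have hemod : PySem.Int.mod uin 4294967296 = uin % 4294967296 :=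
    PySem.Int.mod_eq_emod_of_pos h0
  rw [hemod]
  conv_lhs => rw [show uin % 4294967296 = (((uin % 4294967296).toNat : Nat) : Int) from by omega,
    show (1162039115:Int) = ((1162039115:Nat):Int) from by norm_num, PySem.Int.bxor_natCast]

-- the four bytes of the mixed word = A's v entries
theorem pvVbyte24 (uin : Int) :
    ((((uin % 4294967296).toNat ^^^ 1162039115 : Nat) : Nat)) / 16777216 % 256
      = ((uin % 4294967296).toNat / 16777216 % 256) ^^^ 69 := by
  have h := pvX1 24 (uin % 4294967296).toNat 1162039115
  norm_num at h
  exact h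

theorem pvVbyte16 (uin : Int) :
    (((uin % 4294967296).toNat ^^^ 1162039115 : Nat)) / 65536 % 256
      = ((uin % 4294967296).toNat / 65536 % 256) ^^^ 67 := by
  have h := pvX1 16 (uin % 4294967296).toNat 1162039115
  norm_num at h
  exact h

theorem pvVbyte8 (uin : Int) :
    (((uin % 4294967296).toNat ^^^ 1162039115 : Nat)) / 256 % 256
      = ((uin % 4294967296).toNat / 256 % 256) ^^^ 79 := by
  have h := pvX1 8 (uin % 4294967296).toNat 1162039115
  norm_num at h
  exact h

theorem pvVbyte0 (uin : Int) :
    (((uin % 4294967296).toNat ^^^ 1162039115 : Nat)) % 256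
      = ((uin % 4294967296).toNat % 256) ^^^ 75 := by
  have h := pvX1 0 (uin % 4294967296).toNat 1162039115
  norm_num at h
  exact h

-- the four v[i] assignments build the 4-byte list
theorem pv_vchain (e0 e1 e2 e3 : Int) :
    PySem.List.pySetD (PySem.List.pySetD (PySem.List.pySetD (PySem.List.pySetD [0,0,0,0] 0 e0) 1 e1) 2 e2) 3 e3
      = [e0, e1, e2, e3] := rfl

-- A's u1 loop interleaves n and v
theorem pv_u1 (a b c d e0 e1 e2 e3 : Int) :
    List.foldl (fun u1 T => PySem.List.pySetD u1 T
      (if PySem.Int.mod T 2 = 0 then PySem.List.pyGetD [a,b,c,d] (T >>> (1:Nat)) 0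
       else PySem.List.pyGetD [e0,e1,e2,e3] (T >>> (1:Nat)) 0))
      [0,0,0,0,0,0,0,0] (PySem.List.pyRange 0 8) = [a, e0, b, e1, c, e2, d, e3] := by
  rw [show PySem.List.pyRange 0 8 = [(0:Int),1,2,3,4,5,6,7] by decide]
  simp only [List.foldl_cons, List.foldl_nil]
  rw [show PySem.List.pySetD [0, 0, 0, 0, 0, 0, 0, 0] 0 (if PySem.Int.mod 0 2 = 0 then PySem.List.pyGetD [a,b,c,d] ((0:Int) >>> (1:Nat)) 0 else PySem.List.pyGetD [e0,e1,e2,e3] ((0:Int) >>> (1:Nat)) 0) = [a, 0, 0, 0, 0, 0, 0, 0] from rfl]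
  rw [show PySem.List.pySetD [a, 0, 0, 0, 0, 0, 0, 0] 1 (if PySem.Int.mod 1 2 = 0 then PySem.List.pyGetD [a,b,c,d] ((1:Int) >>> (1:Nat)) 0 else PySem.List.pyGetD [e0,e1,e2,e3] ((1:Int) >>> (1:Nat)) 0) = [a, e0, 0, 0, 0, 0, 0, 0] from rfl]
  rw [show PySem.List.pySetD [a, e0, 0, 0, 0, 0, 0, 0] 2 (if PySem.Int.mod 2 2 = 0 then PySem.List.pyGetD [a,b,c,d] ((2:Int) >>> (1:Nat)) 0 else PySem.List.pyGetD [e0,e1,e2,e3] ((2:Int) >>> (1:Nat)) 0) = [a, e0, b, 0, 0, 0, 0, 0] from rfl]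
  rw [show PySem.List.pySetD [a, e0, b, 0, 0, 0, 0, 0] 3 (if PySem.Int.mod 3 2 = 0 then PySem.List.pyGetD [a,b,c,d] ((3:Int) >>> (1:Nat)) 0 else PySem.List.pyGetD [e0,e1,e2,e3] ((3:Int) >>> (1:Nat)) 0) = [a, e0, b, e1, 0, 0, 0, 0] from rfl]
  rw [show PySem.List.pySetD [a, e0, b, e1, 0, 0, 0, 0] 4 (if PySem.Int.mod 4 2 = 0 then PySem.List.pyGetD [a,b,c,d] ((4:Int) >>> (1:Nat)) 0 else PySem.List.pyGetD [e0,e1,e2,e3] ((4:Int) >>> (1:Nat)) 0) = [a, e0, b, e1, c, 0, 0, 0] from rfl]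
  rw [show PySem.List.pySetD [a, e0, b, e1, c, 0, 0, 0] 5 (if PySem.Int.mod 5 2 = 0 then PySem.List.pyGetD [a,b,c,d] ((5:Int) >>> (1:Nat)) 0 else PySem.List.pyGetD [e0,e1,e2,e3] ((5:Int) >>> (1:Nat)) 0) = [a, e0, b, e1, c, e2, 0, 0] from rfl]
  rw [show PySem.List.pySetD [a, e0, b, e1, c, e2, 0, 0] 6 (if PySem.Int.mod 6 2 = 0 then PySem.List.pyGetD [a,b,c,d] ((6:Int) >>> (1:Nat)) 0 else PySem.List.pyGetD [e0,e1,e2,e3] ((6:Int) >>> (1:Nat)) 0) = [a, e0, b, e1, c, e2, d, 0] from rfl]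
  rw [show PySem.List.pySetD [a, e0, b, e1, c, e2, d, 0] 7 (if PySem.Int.mod 7 2 = 0 then PySem.List.pyGetD [a,b,c,d] ((7:Int) >>> (1:Nat)) 0 else PySem.List.pyGetD [e0,e1,e2,e3] ((7:Int) >>> (1:Nat)) 0) = [a, e0, b, e1, c, e2, d, e3] from rfl]

-- B's digit loop, abstracted
def pvG : Int × List Char → Int × List Char :=
  fun st => (st.1 / 16, st.2 ++ [PySem.List.pyGetD "0123456789ABCDEF".toList (st.1 % 16) ' '])

def pvVal (bs : List Int) : Int := bs.foldl (fun h b => h * 256 + b) 0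

theorem pvFoldlConst {α : Type} (f : α → α) (l : List Int) : ∀ (init : α),
    l.foldl (fun st _ => f st) init = f^[l.length] init := by
  induction l with
  | nil => intro init; simp
  | cons x t ih =>
      intro init
      simp only [List.foldl_cons, List.length_cons, Function.iterate_succ_apply, ih]

theorem pvDigits (bs : List Int) : (∀ b ∈ bs, 0 ≤ b ∧ b < 256) → ∀ (acc : List Char),
    pvG^[2 * bs.length] (pvVal bs, acc)
      = (0, acc ++ bs.reverse.flatMap (fun b =>
          [PySem.List.pyGetD "0123456789ABCDEF".toList (b % 16) ' ',
           PySem.List.pyGetD "0123456789ABCDEF".toList (b / 16 % 16) ' '])) := by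
  induction bs using List.reverseRecOn with
  | nil => intro _ acc; simp [pvVal]
  | append_singleton t b ih =>
      intro hb acc
      have hbb := hb b (by simp)
      have hval : pvVal (t ++ [b]) = pvVal t * 256 + b := by
        simp [pvVal, List.foldl_append]
      have hlen : 2 * (t ++ [b]).length = 2 * t.length + 2 := by simp; omega
      rw [hval, hlen, Function.iterate_add_apply]
      have hstep : pvG^[2] (pvVal t * 256 + b, acc)
          = (pvVal t, acc ++ [PySem.List.pyGetD "0123456789ABCDEF".toList (b % 16) ' ',
              PySem.List.pyGetD "0123456789ABCDEF".toList (b / 16 % 16) ' ']) := by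
        show pvG (pvG (pvVal t * 256 + b, acc)) = _
        simp only [pvG]
        rw [show (pvVal t * 256 + b) / 16 = pvVal t * 16 + b / 16 by omega,
            show (pvVal t * 256 + b) % 16 = b % 16 by omega,
            show (pvVal t * 16 + b / 16) / 16 = pvVal t by omega,
            show (pvVal t * 16 + b / 16) % 16 = b / 16 % 16 by omega]
        simp
      rw [hstep, ih (fun x hx => hb x (by simp [hx]))]
      simp

-- undo the final reversal
theorem pvRevFlat (lo hi : Int → Char) (bs : List Int) :
    ((bs.reverse.flatMap (fun b => [lo b, hi b])).reverse) = bs.flatMap (fun b => [hi b, lo b]) := by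
  induction bs with
  | nil => simp
  | cons x t ih => simp [List.flatMap_append, ih]

theorem pvCastBound (x : Nat) (h : x < 256) : 0 ≤ ((x:Nat):Int) ∧ ((x:Nat):Int) < 256 :=
  ⟨Int.natCast_nonneg _, by exact_mod_cast h⟩

-- sixteen divmod steps on the packed interleaved word emit the 32 bucket/key nibbles
theorem pvDigits8 (x0 y0 x1 y1 x2 y2 x3 y3 : Int)
    (h : ∀ b ∈ [x0, y0, x1, y1, x2, y2, x3, y3], 0 ≤ b ∧ b < 256) :
    pvG^[16] (((((0 * 65536 + x0 * 256 + y0) * 65536 + x1 * 256 + y1) * 65536 + x2 * 256 + y2)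
        * 65536 + x3 * 256 + y3), ([] : List Char))
      = (0, ([x0, y0, x1, y1, x2, y2, x3, y3] : List Int).reverse.flatMap (fun b =>
          [PySem.List.pyGetD "0123456789ABCDEF".toList (b % 16) ' ',
           PySem.List.pyGetD "0123456789ABCDEF".toList (b / 16 % 16) ' '])) := by
  have hv : ((((0 * 65536 + x0 * 256 + y0) * 65536 + x1 * 256 + y1) * 65536 + x2 * 256 + y2)
        * 65536 + x3 * 256 + y3) = pvVal [x0, y0, x1, y1, x2, y2, x3, y3] := by
    simp [pvVal]
    ring
  rw [hv, show (16:Nat) = 2 * ([x0, y0, x1, y1, x2, y2, x3, y3] : List Int).length from by simp]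
  rw [pvDigits _ h []]
  simp

-- ===== VERDICT (by name: the statement is the Claim_ definition above) =====
theorem smartqq_hash_spec : Claim_equal_smartqq_hash := by
  intro uin ptwebqq hdom
  have hchars : ∀ c ∈ ptwebqq.toList, c.toNat < 256 := by
    intro c hc
    unfold Dom_smartqq_hash at hdom
    simp only [Bool.and_eq_true, pvDomStr, List.all_eq_true] at hdom
    have := hdom.2 c hc
    simp [pvDomChar] at this
    omega
  unfold Spec_smartqq_hash smartqq_hash smartqq_hash_alt
  dsimp only
  refine congrArg String.ofList ?_
  -- A: bucket loop → pvRefN casts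
  rw [pv_foldl_pyRange_enumerate ptwebqq.toList ' '
    (fun acc T x => PySem.List.pySetD acc (PySem.Int.mod T 4)
      (PySem.Int.bxor (PySem.List.pyGetD acc (PySem.Int.mod T 4) 0) (pvOrd x))) [0,0,0,0]]
  have hbuck := pvBucketA ptwebqq.toList 0 0 0 0 0 (by norm_num)
  simp only [Nat.cast_zero, Nat.zero_xor] at hbuck
  rw [hbuck]
  -- A: v entries
  rw [show pvOrd (PySem.List.pyGetD "ECOK".toList 0 ' ') = 69 from rfl,
      show pvOrd (PySem.List.pyGetD "ECOK".toList 1 ' ') = 67 from rfl,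
      show pvOrd (PySem.List.pyGetD "ECOK".toList 2 ' ') = 79 from rfl,
      show pvOrd (PySem.List.pyGetD "ECOK".toList 3 ' ') = 75 from rfl]
  rw [pv_vchain, pv_u1]
  -- A: output loop → flatMap
  simp only [List.append_assoc, List.singleton_append]
  rw [PySem.List.foldl_append_eq_flatMap (fun (aU1 : Int) =>
    [PySem.List.pyGetD "0123456789ABCDEF".toList (PySem.Int.band (aU1 >>> (4:Nat)) 15) ' ',
     PySem.List.pyGetD "0123456789ABCDEF".toList (PySem.Int.band (aU1 >>> (0:Nat)) 15) ' '])]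
  simp only [List.nil_append]
  -- A: uin bytes as casts
  rw [pvEcast24 uin, pvEcast16 uin, pvEcast8 uin, pvEcast0 uin]
  -- B: word XOR as a cast
  have hN : pvWordXor 0 ptwebqq.toList = ((pvWordN ptwebqq.toList : Nat) : Int) := by
    have h := pvWordXor_eq ptwebqq.toList 0
    simpa using h
  rw [hN, show ((2:Int) ^ (32:Nat)) = (4294967296:Int) from by norm_num, pvVcast uin]
  -- B: the packing fold over (24, 16, 8, 0)
  simp only [List.foldl_cons, List.foldl_nil]
  rw [show ((2:Int) ^ (24:Nat)) = ((16777216:Nat):Int) from by norm_num,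
      show ((2:Int) ^ (16:Nat)) = ((65536:Nat):Int) from by norm_num,
      show ((2:Int) ^ (8:Nat)) = ((256:Nat):Int) from by norm_num,
      show ((2:Int) ^ (0:Nat)) = ((1:Nat):Int) from by norm_num]
  rw [pvByteCast (pvWordN ptwebqq.toList) 16777216 (by norm_num),
      pvByteCast (pvWordN ptwebqq.toList) 65536 (by norm_num),
      pvByteCast (pvWordN ptwebqq.toList) 256 (by norm_num),
      pvByteCast (pvWordN ptwebqq.toList) 1 (by norm_num),
      pvByteCast ((uin % 4294967296).toNat ^^^ 1162039115) 16777216 (by norm_num),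
      pvByteCast ((uin % 4294967296).toNat ^^^ 1162039115) 65536 (by norm_num),
      pvByteCast ((uin % 4294967296).toNat ^^^ 1162039115) 256 (by norm_num),
      pvByteCast ((uin % 4294967296).toNat ^^^ 1162039115) 1 (by norm_num)]
  have hwb := pvWordBytes ptwebqq.toList hchars
  simp only [Nat.div_one] at hwb ⊢
  rw [hwb.1, hwb.2.1, hwb.2.2.1, hwb.2.2.2]
  rw [pvVbyte24 uin, pvVbyte16 uin, pvVbyte8 uin, pvVbyte0 uin]
  -- B: digit loop → iterate of pvG
  rw [show (fun (st : Int × List Char) (_ : Int) =>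
        (PySem.Int.floordiv st.1 16,
         st.2 ++ [PySem.List.pyGetD "0123456789ABCDEF".toList (PySem.Int.mod st.1 16) ' ']))
      = (fun (st : Int × List Char) (_ : Int) => pvG st) from funext fun st => funext fun _ => by
        simp only [pvG, PySem.Int.floordiv_eq_ediv_of_pos (show (0:Int) < 16 by norm_num),
          PySem.Int.mod_eq_emod_of_pos (show (0:Int) < 16 by norm_num)]]
  rw [pvFoldlConst pvG (PySem.List.pyRange 0 16)]
  rw [show (PySem.List.pyRange 0 16).length = 16 from by decide]
  -- bounds for the eight packed bytes
  have hrl := pvRefN_lt ptwebqq.toList hchars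
  have hm24 : (uin % 4294967296).toNat / 16777216 % 256 < 256 := Nat.mod_lt _ (by norm_num)
  have hm16 : (uin % 4294967296).toNat / 65536 % 256 < 256 := Nat.mod_lt _ (by norm_num)
  have hm8 : (uin % 4294967296).toNat / 256 % 256 < 256 := Nat.mod_lt _ (by norm_num)
  have hm0 : (uin % 4294967296).toNat % 256 < 256 := Nat.mod_lt _ (by norm_num)
  rw [pvDigits8 _ _ _ _ _ _ _ _ (by
    intro b hb
    simp only [List.mem_cons, List.not_mem_nil, or_false] at hb
    rcases hb with h | h | h | h | h | h | h | h <;> subst h <;>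
      refine pvCastBound _ ?_ <;>
      first
        | exact hrl.1
        | exact hrl.2.1
        | exact hrl.2.2.1
        | exact hrl.2.2.2
        | exact pvXorLt _ _ hm24 (by norm_num)
        | exact pvXorLt _ _ hm16 (by norm_num)
        | exact pvXorLt _ _ hm8 (by norm_num)
        | exact pvXorLt _ _ hm0 (by norm_num))]
  -- reduce the pair projection, then undo the final reversal
  dsimp only
  rw [pvRevFlat (fun b => PySem.List.pyGetD "0123456789ABCDEF".toList (b % 16) ' ')
      (fun b => PySem.List.pyGetD "0123456789ABCDEF".toList (b / 16 % 16) ' ')]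
  -- A's nibble indices in the same arithmetic form
  simp only [pvBand15, pvShiftR4,
    show ∀ (y : Int), y >>> (0:Nat) = y from fun y => by rw [pvShiftR]; norm_num]
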